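-- pv_equiv track=rewrite | github.com/DDivanisov/Vestacka-Inteligencija-2024 | Constrains/Z4L2-Schedule-Presentation.py | num_papers_per_term
-- ===== SOURCE A (Python) =====
-- def num_papers_per_term(*args):
--     T1, T2, T3 = 0, 0, 0
--     T4 = 0
--     for paper in args:
--         if paper == "T1":
--             T1 += 1
--         if paper == "T2":
--             T2 += 1
--         if paper == "T3":
--             T3 += 1
--         if paper == "T4":
--             T4 += 1
--     if T1 > 4 or T2 > 4 or T3 > 4 or T4 > 4:
--         return False
--     return True
-- ===== SOURCE B (Python) =====
-- def num_papers_per_term(*args):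
--     # Sort the term labels; a label occurs more than 4 times iff, in the
--     # sorted list, some element equals the element 4 positions later.
--     s = sorted(a for a in args if a in ("T1", "T2", "T3", "T4"))
--     return all(x != y for x, y in zip(s, s[4:]))
-- ===== Notes on version B (the rewrite author's own statement) =====
-- stated objective: alternative
-- what changed: Replaces the four per-element counters with a sort-then-scan: filter to the four labels, sort, and check that no element equals the one 4 positions ahead (a run of 5 equal labels exists iff some count exceeds 4); no counts are ever computed.
import Mathlib
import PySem

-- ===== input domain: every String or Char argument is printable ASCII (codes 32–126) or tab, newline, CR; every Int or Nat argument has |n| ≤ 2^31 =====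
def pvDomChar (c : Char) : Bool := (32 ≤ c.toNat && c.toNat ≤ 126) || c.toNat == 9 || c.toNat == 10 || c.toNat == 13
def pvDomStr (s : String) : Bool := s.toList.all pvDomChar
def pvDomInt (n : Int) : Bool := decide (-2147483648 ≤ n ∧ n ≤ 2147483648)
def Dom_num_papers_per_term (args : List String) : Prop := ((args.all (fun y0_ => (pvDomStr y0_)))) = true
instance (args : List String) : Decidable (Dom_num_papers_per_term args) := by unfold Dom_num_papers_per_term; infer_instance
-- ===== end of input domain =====

-- B: sort-then-scan instead of counters — filter to the four labels, sort, and check no element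
-- equals the one 4 positions ahead; proved equal to A's counter loop (objective: alternative).


-- ===== PORT A =====
-- step of A's loop: four independent `if paper == "Ti"` counter updates
def pvStepA (s : Int × Int × Int × Int) (paper : String) : Int × Int × Int × Int :=
  let s := if paper == "T1" then (s.1 + 1, s.2.1, s.2.2.1, s.2.2.2) else s
  let s := if paper == "T2" then (s.1, s.2.1 + 1, s.2.2.1, s.2.2.2) else s
  let s := if paper == "T3" then (s.1, s.2.1, s.2.2.1 + 1, s.2.2.2) else s
  let s := if paper == "T4" then (s.1, s.2.1, s.2.2.1, s.2.2.2 + 1) else s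
  s

def num_papers_per_term (args : List String) : Bool :=
  let st := args.foldl pvStepA (0, 0, 0, 0)
  if st.1 > 4 ∨ st.2.1 > 4 ∨ st.2.2.1 > 4 ∨ st.2.2.2 > 4 then false else true

-- ===== PORT B =====
def num_papers_per_term_alt (args : List String) : Bool :=
  let s := PySem.List.sorted
    (args.filter (fun a => a == "T1" || a == "T2" || a == "T3" || a == "T4"))
    (fun x => x) false
  (s.zip (PySem.List.slice s (some 4) none)).all (fun p => p.1 != p.2)

-- ===== PRECONDITION & SPEC =====
def Spec_num_papers_per_term (args : List String) (out : Bool) : Prop := out = num_papers_per_term_alt args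
instance (args : List String) (out : Bool) : Decidable (Spec_num_papers_per_term args out) := by unfold Spec_num_papers_per_term; infer_instance

-- ===== CLAIM (what is proved, stated in full; the proofs are below) =====
def Claim_equal_num_papers_per_term : Prop := ∀ (args : List String), Dom_num_papers_per_term args → Spec_num_papers_per_term args (num_papers_per_term args)

-- ===== LEMMAS AND PROOFS =====

-- xs[4:] is drop 4
lemma pvSlice4 (s : List String) : PySem.List.slice s (some 4) none = s.drop 4 := by
  rw [PySem.List.slice_from s (by norm_num)]; rfl

-- the fold's four accumulators are the counts of the four labels
lemma pvFoldA_eq (args : List String) : ∀ a b c d : Int,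
    args.foldl pvStepA (a, b, c, d) =
      (a + args.count "T1", b + args.count "T2", c + args.count "T3", d + args.count "T4") := by
  induction args with
  | nil => intro a b c d; simp
  | cons x xs ih =>
    intro a b c d
    simp only [List.foldl_cons, List.count_cons, pvStepA]
    by_cases h1 : x = "T1" <;> by_cases h2 : x = "T2" <;> by_cases h3 : x = "T3" <;>
      by_cases h4 : x = "T4" <;> simp_all <;> ring_nf

-- in a ≤-sorted list, some element equals the element 4 positions later iff some value occurs ≥ 5 times
lemma pvZipScan_iff (s : List String) (h : s.Pairwise (· ≤ ·)) :
    ((s.zip (s.drop 4)).all (fun p => p.1 != p.2)) = false ↔ ∃ t, 5 ≤ s.count t := by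
  have mono := List.pairwise_iff_getElem.mp h
  constructor
  · intro hall
    rw [List.all_eq_false] at hall
    obtain ⟨p, hp, hne⟩ := hall
    obtain ⟨i, hi, hget⟩ := List.getElem_of_mem hp
    have hlen : i + 4 < s.length := by
      simp only [List.length_zip, List.length_drop] at hi; omega
    have hpair : p = (s[i]'(by omega), s[4 + i]'(by omega)) := by
      rw [← hget, List.getElem_zip, List.getElem_drop]
    have heq : s[i]'(by omega) = s[4 + i]'(by omega) := by
      have := hne; rw [hpair] at this; simpa using this
    refine ⟨s[i]'(by omega), ?_⟩
    have hrep : (s.drop i).take 5 = List.replicate 5 (s[i]'(by omega)) := by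
      apply List.ext_getElem
      · simp [List.length_take, List.length_drop]; omega
      · intro j hj _
        simp only [List.length_take, List.length_drop] at hj
        rw [List.getElem_take, List.getElem_drop, List.getElem_replicate]
        have hij : i + j < s.length := by omega
        have h1 : s[i]'(by omega) ≤ s[i + j]'hij := by
          rcases Nat.eq_or_lt_of_le (Nat.le_add_right i j) with he | hl
          · exact le_of_eq (by congr 1)
          · exact mono i (i + j) (by omega) hij hl
        have h2 : s[i + j]'hij ≤ s[4 + i]'(by omega) := by
          rcases Nat.lt_or_ge (i + j) (4 + i) with hl | hg
          · exact mono (i + j) (4 + i) hij (by omega) hl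
          · exact le_of_eq (by congr 1; omega)
        exact le_antisymm (heq.symm ▸ h2) h1
    have hsub : List.Sublist (List.replicate 5 (s[i]'(by omega))) s := by
      rw [← hrep]
      exact (List.take_sublist 5 (s.drop i)).trans (List.drop_sublist i s)
    have := List.Sublist.count_le (s[i]'(by omega)) hsub
    simpa using this
  · rintro ⟨t, ht⟩
    have hsub : List.Sublist (List.replicate 5 t) s :=
      List.replicate_sublist_iff.mpr ht
    obtain ⟨is, his, hpls⟩ := List.sublist_eq_map_getElem hsub
    have hlen5 : is.length = 5 := by
      have := congrArg List.length his; simpa using this.symm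
    have hmonos := List.pairwise_iff_getElem.mp hpls
    have hv : ∀ k (hk : k < is.length), s[(is[k]'hk : Nat)]'(is[k]'hk).isLt = t := by
      intro k hk
      have := congrArg (fun l => l[k]?) his
      simp only [List.getElem?_replicate, List.getElem?_map] at this
      rw [List.getElem?_eq_getElem hk] at this
      simp only [Option.map_some] at this
      have hk5 : k < 5 := by omega
      simp [hk5] at this
      exact this.symm
    have h0 : (0:Nat) < is.length := by omega
    have h4 : (4:Nat) < is.length := by omega
    have chain : (is[0]'h0 : Nat) + 4 ≤ (is[4]'h4 : Nat) := by
      have c01 := hmonos 0 1 h0 (by omega) (by omega)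
      have c12 := hmonos 1 2 (by omega) (by omega) (by omega)
      have c23 := hmonos 2 3 (by omega) (by omega) (by omega)
      have c34 := hmonos 3 4 (by omega) h4 (by omega)
      omega
    set i : Nat := (is[0]'h0 : Nat) with hidef
    have hi4 : i + 4 < s.length := by
      have := (is[4]'h4).isLt; omega
    have hsi : s[i]'(by omega) = t := hv 0 h0
    have hsi4 : s[i + 4]'hi4 = t := by
      rcases Nat.eq_or_lt_of_le chain with he | hl
      · rw [← hv 4 h4]; congr 1
      · have hle1 : s[i]'(by omega) ≤ s[i + 4]'hi4 := mono i (i + 4) (by omega) hi4 (by omega)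
        have hle2 : s[i + 4]'hi4 ≤ s[(is[4]'h4 : Nat)]'(is[4]'h4).isLt :=
          mono (i + 4) _ hi4 _ hl
        rw [hsi] at hle1; rw [hv 4 h4] at hle2
        exact le_antisymm hle2 hle1
    rw [List.all_eq_false]
    have hiz : i < (s.zip (s.drop 4)).length := by
      simp only [List.length_zip, List.length_drop]; omega
    refine ⟨(s.zip (s.drop 4))[i]'hiz, List.getElem_mem hiz, ?_⟩
    rw [List.getElem_zip, List.getElem_drop]
    have h4i : s[4 + i]'(by omega) = t := by rw [← hsi4]; congr 1; omega
    simp [hsi, h4i]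

-- ===== VERDICT (by name: the statement is the Claim_ definition above) =====
theorem num_papers_per_term_spec : Claim_equal_num_papers_per_term := by
  intro args _
  show num_papers_per_term args = num_papers_per_term_alt args
  have hB : num_papers_per_term_alt args =
      (((PySem.List.sorted
          (args.filter (fun a => a == "T1" || a == "T2" || a == "T3" || a == "T4"))
          (fun x => x) false).zip
        ((PySem.List.sorted
          (args.filter (fun a => a == "T1" || a == "T2" || a == "T3" || a == "T4"))
          (fun x => x) false).drop 4)).all (fun p => p.1 != p.2)) := by
    simp only [num_papers_per_term_alt, pvSlice4]
  rw [hB]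
  simp only [num_papers_per_term]
  rw [pvFoldA_eq args 0 0 0 0]
  set pred : String → Bool := fun a => a == "T1" || a == "T2" || a == "T3" || a == "T4" with hpred
  set s := PySem.List.sorted (args.filter pred) (fun x => x) false with hs
  have hperm : s.Perm (args.filter pred) := PySem.List.sorted_perm (args.filter pred) (fun x => x) false
  have hpair : s.Pairwise (· ≤ ·) := PySem.List.sorted_pairwise (args.filter pred) (fun x => x)
  have hcount : ∀ t : String, pred t = true → s.count t = args.count t := by
    intro t ht
    rw [hperm.count_eq, List.count_filter ht]
  have hzero : ∀ t : String, pred t = false → s.count t = 0 := by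
    intro t ht
    rw [List.count_eq_zero]
    intro hmem
    rw [hs, PySem.List.mem_sorted] at hmem
    have := List.of_mem_filter hmem
    rw [ht] at this; cases this
  have hiff : (∃ t, 5 ≤ s.count t) ↔
      (4 < args.count "T1" ∨ 4 < args.count "T2" ∨ 4 < args.count "T3" ∨ 4 < args.count "T4") := by
    constructor
    · rintro ⟨t, ht⟩
      cases hp : pred t with
      | false => rw [hzero t hp] at ht; omega
      | true =>
        rw [hcount t hp] at ht
        simp only [hpred] at hp
        rcases (by simpa [or_assoc] using hp : t = "T1" ∨ t = "T2" ∨ t = "T3" ∨ t = "T4") with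
          h | h | h | h <;> subst h <;> omega
    · rintro (h | h | h | h)
      · exact ⟨"T1", by rw [hcount "T1" (by decide)]; omega⟩
      · exact ⟨"T2", by rw [hcount "T2" (by decide)]; omega⟩
      · exact ⟨"T3", by rw [hcount "T3" (by decide)]; omega⟩
      · exact ⟨"T4", by rw [hcount "T4" (by decide)]; omega⟩
  by_cases hbig : ∃ t, 5 ≤ s.count t
  · rw [(pvZipScan_iff s hpair).mpr hbig]
    rw [if_pos]
    rcases hiff.mp hbig with h | h | h | h
    · left; push_cast; omega
    · right; left; push_cast; omega
    · right; right; left; push_cast; omega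
    · right; right; right; push_cast; omega
  · have hT : ((s.zip (s.drop 4)).all (fun p => p.1 != p.2)) = true := by
      cases e : ((s.zip (s.drop 4)).all (fun p => p.1 != p.2)) with
      | false => exact absurd ((pvZipScan_iff s hpair).mp e) hbig
      | true => rfl
    rw [hT, if_neg]
    intro hcond
    apply hbig
    apply hiff.mpr
    rcases hcond with h | h | h | h
    · left; push_cast at h; omega
    · right; left; push_cast at h; omega
    · right; right; left; push_cast at h; omega
    · right; right; right; push_cast at h; omega
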